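-- pv_equiv track=rewrite | github.com/Om-Jadon/orion--cli-assistant | tools/shell.py | _is_destructive_git
-- ===== SOURCE A (Python) =====
-- def _is_destructive_git(tokens: list[str]) -> bool:
--     if not tokens:
--         return False
--     sub = tokens[0]
--     rest = tokens[1:]
--
--     if sub == "reset" and any(flag in rest for flag in ("--hard", "--mixed", "--soft")):
--         return True
--     if sub == "clean" and any(flag in rest for flag in ("-f", "-fd", "-fdx", "-xdf", "-x")):
--         return True
--     if sub == "checkout" and "--" in rest:
--         return True
--     if sub == "restore" and any(flag in rest for flag in ("--staged", "--worktree", "--source")):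
--         return True
--     if sub == "branch" and any(flag in rest for flag in ("-D", "--delete")):
--         return True
--     if sub == "tag" and "-d" in rest:
--         return True
--     if sub == "push" and any(flag in rest for flag in ("-f", "--force", "--force-with-lease")):
--         return True
--     return False
-- ===== SOURCE B (Python) =====
-- # Inverted index: flag -> subcommands it makes destructive; one early-return scan.
-- _TRIGGERS = {
--     "--hard": ("reset",), "--mixed": ("reset",), "--soft": ("reset",),
--     "-f": ("clean", "push"), "-fd": ("clean",), "-fdx": ("clean",),
--     "-xdf": ("clean",), "-x": ("clean",),
--     "--": ("checkout",),
--     "--staged": ("restore",), "--worktree": ("restore",), "--source": ("restore",),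
--     "-D": ("branch",), "--delete": ("branch",),
--     "-d": ("tag",),
--     "--force": ("push",), "--force-with-lease": ("push",),
-- }
--
--
-- def _is_destructive_git(tokens: list[str]) -> bool:
--     if not tokens:
--         return False
--     sub = tokens[0]
--     for tok in tokens[1:]:
--         if sub in _TRIGGERS.get(tok, ()):
--             return True
--     return False
-- ===== Notes on version B (the rewrite author's own statement) =====
-- stated objective: alternative
-- what changed: Inverted the data layout: instead of seven subcommand branches each scanning the rest once per flag, B keeps an inverted index flag->subcommands and makes one early-return pass over the remaining tokens, asking whether the subcommand is in the current token's trigger set.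
import Mathlib
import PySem

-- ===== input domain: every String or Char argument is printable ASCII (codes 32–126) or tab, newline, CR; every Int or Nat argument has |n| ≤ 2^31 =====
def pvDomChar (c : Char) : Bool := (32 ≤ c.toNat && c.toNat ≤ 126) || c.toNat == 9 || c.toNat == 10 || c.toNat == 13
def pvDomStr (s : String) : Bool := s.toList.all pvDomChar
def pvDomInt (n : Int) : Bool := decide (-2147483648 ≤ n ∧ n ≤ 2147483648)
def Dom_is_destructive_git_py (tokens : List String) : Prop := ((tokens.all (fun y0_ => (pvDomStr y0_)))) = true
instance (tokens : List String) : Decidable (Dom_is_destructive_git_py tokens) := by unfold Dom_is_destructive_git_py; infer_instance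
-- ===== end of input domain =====

-- B inverts A's data layout: an index flag -> subcommands it makes destructive, walked
-- recursively over the remaining tokens with an early return (objective: alternative).

-- ===== PORT A =====
def is_destructive_git_py (tokens : List String) : Bool :=
  match tokens with
  | [] => false
  | sub :: rest =>
    if sub == "reset" && (["--hard", "--mixed", "--soft"].any (fun flag => rest.contains flag)) then true
    else if sub == "clean" && (["-f", "-fd", "-fdx", "-xdf", "-x"].any (fun flag => rest.contains flag)) then true
    else if sub == "checkout" && rest.contains "--" then true
    else if sub == "restore" && (["--staged", "--worktree", "--source"].any (fun flag => rest.contains flag)) then true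
    else if sub == "branch" && (["-D", "--delete"].any (fun flag => rest.contains flag)) then true
    else if sub == "tag" && rest.contains "-d" then true
    else if sub == "push" && (["-f", "--force", "--force-with-lease"].any (fun flag => rest.contains flag)) then true
    else false

-- ===== PORT B =====
-- the Python dict _TRIGGERS (inverted index: flag -> subcommands it triggers)
def pvTriggers : PySem.Dict String (List String) := PySem.Dict.ofList
  [("--hard", ["reset"]), ("--mixed", ["reset"]), ("--soft", ["reset"]),
   ("-f", ["clean", "push"]), ("-fd", ["clean"]), ("-fdx", ["clean"]),
   ("-xdf", ["clean"]), ("-x", ["clean"]),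
   ("--", ["checkout"]),
   ("--staged", ["restore"]), ("--worktree", ["restore"]), ("--source", ["restore"]),
   ("-D", ["branch"]), ("--delete", ["branch"]),
   ("-d", ["tag"]),
   ("--force", ["push"]), ("--force-with-lease", ["push"])]

-- Source B’s early-return scan over the remaining tokens, as structural recursion
def pvWalk (sub : String) : List String → Bool
  | [] => false
  | t :: rest =>
    if (PySem.Dict.getD pvTriggers t []).contains sub then true
    else pvWalk sub rest

def is_destructive_git_py_alt (tokens : List String) : Bool :=
  match tokens with
  | [] => false
  | sub :: rest => pvWalk sub rest

-- ===== PRECONDITION & SPEC =====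
def Spec_is_destructive_git_py (tokens : List String) (out : Bool) : Prop := out = is_destructive_git_py_alt tokens
instance (tokens : List String) (out : Bool) : Decidable (Spec_is_destructive_git_py tokens out) := by unfold Spec_is_destructive_git_py; infer_instance

-- ===== CLAIM (what is proved, stated in full; the proofs are below) =====
def Claim_equal_is_destructive_git_py : Prop := ∀ (tokens : List String), Dom_is_destructive_git_py tokens → Spec_is_destructive_git_py tokens (is_destructive_git_py tokens)

-- ===== LEMMAS AND PROOFS =====

-- the fold-built dict literal, materialised
theorem pvTriggers_eq_mk : pvTriggers = PySem.Dict.mk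
  [("--hard", ["reset"]), ("--mixed", ["reset"]), ("--soft", ["reset"]),
   ("-f", ["clean", "push"]), ("-fd", ["clean"]), ("-fdx", ["clean"]),
   ("-xdf", ["clean"]), ("-x", ["clean"]),
   ("--", ["checkout"]),
   ("--staged", ["restore"]), ("--worktree", ["restore"]), ("--source", ["restore"]),
   ("-D", ["branch"]), ("--delete", ["branch"]),
   ("-d", ["tag"]),
   ("--force", ["push"]), ("--force-with-lease", ["push"])] := by rfl

-- membership of sub in the trigger set of one token, as a boolean formula
set_option maxHeartbeats 1000000 in
theorem pvTrig_contains (h sub : String) :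
    ((PySem.Dict.getD pvTriggers h []).contains sub) =
    ((sub == "reset" && (h == "--hard" || h == "--mixed" || h == "--soft")) ||
     (sub == "clean" && (h == "-f" || h == "-fd" || h == "-fdx" || h == "-xdf" || h == "-x")) ||
     (sub == "checkout" && h == "--") ||
     (sub == "restore" && (h == "--staged" || h == "--worktree" || h == "--source")) ||
     (sub == "branch" && (h == "-D" || h == "--delete")) ||
     (sub == "tag" && h == "-d") ||
     (sub == "push" && (h == "-f" || h == "--force" || h == "--force-with-lease"))) := by
  by_cases h1 : h = "--hard"
  · subst h1; rw [show PySem.Dict.getD pvTriggers "--hard" [] = ["reset"] from rfl]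
    rw [Bool.eq_iff_iff]; simp [List.contains_eq_mem]
  by_cases h2 : h = "--mixed"
  · subst h2; rw [show PySem.Dict.getD pvTriggers "--mixed" [] = ["reset"] from rfl]
    rw [Bool.eq_iff_iff]; simp [List.contains_eq_mem]
  by_cases h3 : h = "--soft"
  · subst h3; rw [show PySem.Dict.getD pvTriggers "--soft" [] = ["reset"] from rfl]
    rw [Bool.eq_iff_iff]; simp [List.contains_eq_mem]
  by_cases h4 : h = "-f"
  · subst h4; rw [show PySem.Dict.getD pvTriggers "-f" [] = ["clean", "push"] from rfl]
    rw [Bool.eq_iff_iff]; simp [List.contains_eq_mem]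
  by_cases h5 : h = "-fd"
  · subst h5; rw [show PySem.Dict.getD pvTriggers "-fd" [] = ["clean"] from rfl]
    rw [Bool.eq_iff_iff]; simp [List.contains_eq_mem]
  by_cases h6 : h = "-fdx"
  · subst h6; rw [show PySem.Dict.getD pvTriggers "-fdx" [] = ["clean"] from rfl]
    rw [Bool.eq_iff_iff]; simp [List.contains_eq_mem]
  by_cases h7 : h = "-xdf"
  · subst h7; rw [show PySem.Dict.getD pvTriggers "-xdf" [] = ["clean"] from rfl]
    rw [Bool.eq_iff_iff]; simp [List.contains_eq_mem]
  by_cases h8 : h = "-x"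
  · subst h8; rw [show PySem.Dict.getD pvTriggers "-x" [] = ["clean"] from rfl]
    rw [Bool.eq_iff_iff]; simp [List.contains_eq_mem]
  by_cases h9 : h = "--"
  · subst h9; rw [show PySem.Dict.getD pvTriggers "--" [] = ["checkout"] from rfl]
    rw [Bool.eq_iff_iff]; simp [List.contains_eq_mem]
  by_cases h10 : h = "--staged"
  · subst h10; rw [show PySem.Dict.getD pvTriggers "--staged" [] = ["restore"] from rfl]
    rw [Bool.eq_iff_iff]; simp [List.contains_eq_mem]
  by_cases h11 : h = "--worktree"
  · subst h11; rw [show PySem.Dict.getD pvTriggers "--worktree" [] = ["restore"] from rfl]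
    rw [Bool.eq_iff_iff]; simp [List.contains_eq_mem]
  by_cases h12 : h = "--source"
  · subst h12; rw [show PySem.Dict.getD pvTriggers "--source" [] = ["restore"] from rfl]
    rw [Bool.eq_iff_iff]; simp [List.contains_eq_mem]
  by_cases h13 : h = "-D"
  · subst h13; rw [show PySem.Dict.getD pvTriggers "-D" [] = ["branch"] from rfl]
    rw [Bool.eq_iff_iff]; simp [List.contains_eq_mem]
  by_cases h14 : h = "--delete"
  · subst h14; rw [show PySem.Dict.getD pvTriggers "--delete" [] = ["branch"] from rfl]
    rw [Bool.eq_iff_iff]; simp [List.contains_eq_mem]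
  by_cases h15 : h = "-d"
  · subst h15; rw [show PySem.Dict.getD pvTriggers "-d" [] = ["tag"] from rfl]
    rw [Bool.eq_iff_iff]; simp [List.contains_eq_mem]
  by_cases h16 : h = "--force"
  · subst h16; rw [show PySem.Dict.getD pvTriggers "--force" [] = ["push"] from rfl]
    rw [Bool.eq_iff_iff]; simp [List.contains_eq_mem]
  by_cases h17 : h = "--force-with-lease"
  · subst h17; rw [show PySem.Dict.getD pvTriggers "--force-with-lease" [] = ["push"] from rfl]
    rw [Bool.eq_iff_iff]; simp [List.contains_eq_mem]
  have hn : PySem.Dict.get? pvTriggers h = none := by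
    rw [pvTriggers_eq_mk]
    simp [Ne.symm h1, Ne.symm h2, Ne.symm h3, Ne.symm h4,
      Ne.symm h5, Ne.symm h6, Ne.symm h7, Ne.symm h8, Ne.symm h9, Ne.symm h10, Ne.symm h11,
      Ne.symm h12, Ne.symm h13, Ne.symm h14, Ne.symm h15, Ne.symm h16, Ne.symm h17,
      PySem.Dict.get?]
  rw [PySem.Dict.getD, hn, Bool.eq_iff_iff]
  simp [h1, h2, h3, h4, h5, h6, h7, h8, h9, h10, h11, h12, h13, h14, h15, h16, h17]

-- the recursive walk computes A's per-subcommand flag scan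
theorem pvWalk_eq (sub : String) (rest : List String) :
    pvWalk sub rest =
    ((sub == "reset" && (["--hard", "--mixed", "--soft"].any (fun flag => rest.contains flag))) ||
     (sub == "clean" && (["-f", "-fd", "-fdx", "-xdf", "-x"].any (fun flag => rest.contains flag))) ||
     (sub == "checkout" && rest.contains "--") ||
     (sub == "restore" && (["--staged", "--worktree", "--source"].any (fun flag => rest.contains flag))) ||
     (sub == "branch" && (["-D", "--delete"].any (fun flag => rest.contains flag))) ||
     (sub == "tag" && rest.contains "-d") ||
     (sub == "push" && (["-f", "--force", "--force-with-lease"].any (fun flag => rest.contains flag)))) := by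
  induction rest with
  | nil => simp [pvWalk]
  | cons h t ih =>
    have hstep : pvWalk sub (h :: t) =
        (((PySem.Dict.getD pvTriggers h []).contains sub) || pvWalk sub t) := by
      by_cases hc : ((PySem.Dict.getD pvTriggers h []).contains sub) = true <;>
        simp [pvWalk, hc]
    rw [hstep, pvTrig_contains, ih]
    rw [Bool.eq_iff_iff]
    simp only [Bool.or_eq_true, Bool.and_eq_true, beq_iff_eq, List.any_eq_true,
      List.contains_eq_mem, List.mem_cons, decide_eq_true_eq]
    by_cases hr : sub = "reset"
    · subst hr; simp [and_or_left, exists_or, @eq_comm String h] <;> tauto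
    by_cases hc : sub = "clean"
    · subst hc; simp [and_or_left, exists_or, @eq_comm String h] <;> tauto
    by_cases hk : sub = "checkout"
    · subst hk; simp [and_or_left, @eq_comm String h]
    by_cases hre : sub = "restore"
    · subst hre; simp [and_or_left, exists_or, @eq_comm String h] <;> tauto
    by_cases hb : sub = "branch"
    · subst hb; simp [and_or_left, exists_or, @eq_comm String h]
    by_cases ht : sub = "tag"
    · subst ht; simp [and_or_left, @eq_comm String h]
    by_cases hp : sub = "push"
    · subst hp; simp [and_or_left, exists_or, @eq_comm String h] <;> tauto
    simp [hr, hc, hk, hre, hb, ht, hp]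

-- ===== VERDICT (by name: the statement is the Claim_ definition above) =====
theorem is_destructive_git_py_spec : Claim_equal_is_destructive_git_py := by
  intro tokens _
  unfold Spec_is_destructive_git_py
  cases tokens with
  | nil => rfl
  | cons sub rest =>
    simp only [is_destructive_git_py, is_destructive_git_py_alt]
    rw [pvWalk_eq]
    split_ifs with h1 h2 h3 h4 h5 h6 h7 <;> simp_all
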